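-- pv_equiv track=rewrite | github.com/dataguy93/worldscore_OCR | ocr_engine.py | _match_player
-- ===== SOURCE A (Python) =====
-- def _normalize_name(n):
--     return (n or "").strip().lower().replace(".", "").replace("-", " ")
--
-- def _match_player(sp_name, result_players):
--     sp_norm = _normalize_name(sp_name)
--     for p in result_players:
--         if _normalize_name(p.get("name")) == sp_norm:
--             return p
--     for p in result_players:
--         rn = _normalize_name(p.get("name"))
--         if sp_norm and rn and (sp_norm in rn or rn in sp_norm):
--             return p
--     return None
-- ===== SOURCE B (Python) =====
-- def _normalize_name(n):
--     return (n or "").strip().lower().replace(".", "").replace("-", " ")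
--
-- def _match_player(sp_name, result_players):
--     sp_norm = _normalize_name(sp_name)
--     sub = None
--     for p in result_players:
--         rn = _normalize_name(p.get("name"))
--         if rn == sp_norm:
--             return p
--         if sub is None and sp_norm and rn and (sp_norm in rn or rn in sp_norm):
--             sub = p
--     return sub
-- ===== Notes on version B (the rewrite author's own statement) =====
-- stated objective: simpler
-- what changed: Single pass that returns at the first exact match and remembers the first substring-match candidate, instead of A's two full passes that normalize every name twice.
import Mathlib
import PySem

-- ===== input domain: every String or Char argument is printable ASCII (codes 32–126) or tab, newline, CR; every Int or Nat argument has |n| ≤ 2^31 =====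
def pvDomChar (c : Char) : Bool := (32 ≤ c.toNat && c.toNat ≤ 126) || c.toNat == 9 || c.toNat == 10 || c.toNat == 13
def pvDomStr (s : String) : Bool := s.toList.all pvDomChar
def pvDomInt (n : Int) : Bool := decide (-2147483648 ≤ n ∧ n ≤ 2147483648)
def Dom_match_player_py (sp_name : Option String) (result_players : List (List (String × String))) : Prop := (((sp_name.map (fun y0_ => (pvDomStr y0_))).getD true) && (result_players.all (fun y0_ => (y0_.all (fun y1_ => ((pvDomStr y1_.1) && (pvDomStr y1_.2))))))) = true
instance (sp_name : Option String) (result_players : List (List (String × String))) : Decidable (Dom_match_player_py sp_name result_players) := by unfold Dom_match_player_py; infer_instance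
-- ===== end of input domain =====

-- B replaces A's two passes by one pass that returns the first exact match immediately and
-- remembers the first substring-match candidate; each name is normalized once (objective: simpler).

-- _normalize_name(n) = (n or "").strip().lower().replace(".", "").replace("-", " ")
def pvNorm (n : Option String) : String :=
  PySem.Str.replace (PySem.Str.replace (PySem.Str.lower (PySem.Str.strip (n.getD ""))) "." "") "-" " "

-- ===== PORT A =====
-- first loop of A: first exact match
def pvLoop1 (sp : String) : List (List (String × String)) → Option (List (String × String))
  | [] => none
  | p :: rest => if pvNorm (List.lookup "name" p) == sp then some p else pvLoop1 sp rest

-- second loop of A: first substring match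
def pvLoop2 (sp : String) : List (List (String × String)) → Option (List (String × String))
  | [] => none
  | p :: rest =>
    let rn := pvNorm (List.lookup "name" p)
    if sp != "" && rn != "" && (PySem.Str.isIn sp rn || PySem.Str.isIn rn sp)
      then some p else pvLoop2 sp rest

def match_player_py (sp_name : Option String) (result_players : List (List (String × String))) : Option (List (String × String)) :=
  let sp := pvNorm sp_name
  match pvLoop1 sp result_players with
  | some p => some p
  | none => pvLoop2 sp result_players

-- ===== PORT B =====
-- single pass carrying the first substring-match candidate
def pvScan (sp : String) (cand : Option (List (String × String))) : List (List (String × String)) → Option (List (String × String))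
  | [] => cand
  | p :: rest =>
    let rn := pvNorm (List.lookup "name" p)
    if rn == sp then some p
    else if cand.isNone && sp != "" && rn != "" && (PySem.Str.isIn sp rn || PySem.Str.isIn rn sp)
      then pvScan sp (some p) rest
      else pvScan sp cand rest

def match_player_py_alt (sp_name : Option String) (result_players : List (List (String × String))) : Option (List (String × String)) :=
  pvScan (pvNorm sp_name) none result_players

-- ===== PRECONDITION & SPEC =====
def Spec_match_player_py (sp_name : Option String) (result_players : List (List (String × String))) (out : Option (List (String × String))) : Prop := out = match_player_py_alt sp_name result_players
instance (sp_name : Option String) (result_players : List (List (String × String))) (out : Option (List (String × String))) : Decidable (Spec_match_player_py sp_name result_players out) := by unfold Spec_match_player_py; infer_instance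

-- ===== CLAIM (what is proved, stated in full; the proofs are below) =====
def Claim_equal_match_player_py : Prop := ∀ (sp_name : Option String) (result_players : List (List (String × String))), Dom_match_player_py sp_name result_players → Spec_match_player_py sp_name result_players (match_player_py sp_name result_players)

-- ===== LEMMAS AND PROOFS =====
-- invariant of B's single pass: exact match wins; otherwise the held candidate; otherwise A's second loop
theorem pvScan_eq (sp : String) (cand : Option (List (String × String))) (l : List (List (String × String))) :
    pvScan sp cand l =
      match pvLoop1 sp l with
      | some p => some p
      | none => match cand with
        | some c => some c
        | none => pvLoop2 sp l := by
  induction l generalizing cand with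
  | nil => cases cand <;> simp [pvScan, pvLoop1, pvLoop2]
  | cons p rest ih =>
    simp only [pvScan, pvLoop1, pvLoop2]
    by_cases hx : (pvNorm (List.lookup "name" p) == sp) = true
    · simp [hx]
    · simp only [hx, if_false, Bool.false_eq_true]
      cases cand with
      | some c => simp [ih]
      | none =>
        by_cases hs : (sp != "" && pvNorm (List.lookup "name" p) != "" &&
            (PySem.Str.isIn sp (pvNorm (List.lookup "name" p)) || PySem.Str.isIn (pvNorm (List.lookup "name" p)) sp)) = true
        · simp only [Option.isNone_none, Bool.true_and, hs, if_true, ih]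
        · rw [Bool.not_eq_true] at hs
          simp only [Option.isNone_none, Bool.true_and, hs, if_false, Bool.false_eq_true, ih]

-- ===== VERDICT (by name: the statement is the Claim_ definition above) =====
theorem match_player_py_spec : Claim_equal_match_player_py := by
  intro sp_name result_players _
  unfold Spec_match_player_py match_player_py match_player_py_alt
  rw [pvScan_eq]
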